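-- pv_equiv track=rewrite | github.com/aanzolaavila/competitive-problems | Ejes Codeforces/Resueltos/A.insomnia_cure.py | calculate
-- ===== SOURCE A (Python) =====
-- def calculate(k, l, m, n, d) -> int:
--     lista = [0] *d
--     for i in range(d):
--         if (i+1) % k == 0: lista[i] = 1
--         elif (i+1) % l == 0: lista[i] = 1
--         elif (i+1) % m == 0: lista[i] = 1
--         elif (i+1) % n == 0: lista[i] = 1
--     return sum(lista)
-- ===== SOURCE B (Python) =====
-- def calculate(k, l, m, n, d) -> int:
--     # inclusion-exclusion: count of 1..d divisible by any of k,l,m,n in O(1)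
--     def gcd(a, b):
--         a, b = abs(a), abs(b)
--         while b:
--             a, b = b, a % b
--         return a
--
--     def lcm(a, b):
--         return abs(a) // gcd(a, b) * abs(b)
--
--     d0 = 0 if d < 0 else d
--     divs = [k, l, m, n]
--     total = 0
--     for mask in range(1, 16):
--         L = 1
--         bits = 0
--         for j in range(4):
--             if (mask >> j) & 1:
--                 L = lcm(L, divs[j])
--                 bits += 1
--         term = d0 // L
--         total += term if bits % 2 == 1 else -term
--     return total
-- ===== Notes on version B (the rewrite author's own statement) =====
-- stated objective: faster
-- what changed: replaces the O(d) day-by-day marking loop with a closed-form inclusion-exclusion sum of floor(d/lcm(S)) over the 15 nonempty subsets S of {k,l,m,n}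
-- outside the precondition, e.g. on calculate(1, 0, 2, 3, 5): A returns 5, B raises ZeroDivisionError; on calculate(0, 1, 1, 1, -3): A returns 0, B raises ZeroDivisionError
import Mathlib
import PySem

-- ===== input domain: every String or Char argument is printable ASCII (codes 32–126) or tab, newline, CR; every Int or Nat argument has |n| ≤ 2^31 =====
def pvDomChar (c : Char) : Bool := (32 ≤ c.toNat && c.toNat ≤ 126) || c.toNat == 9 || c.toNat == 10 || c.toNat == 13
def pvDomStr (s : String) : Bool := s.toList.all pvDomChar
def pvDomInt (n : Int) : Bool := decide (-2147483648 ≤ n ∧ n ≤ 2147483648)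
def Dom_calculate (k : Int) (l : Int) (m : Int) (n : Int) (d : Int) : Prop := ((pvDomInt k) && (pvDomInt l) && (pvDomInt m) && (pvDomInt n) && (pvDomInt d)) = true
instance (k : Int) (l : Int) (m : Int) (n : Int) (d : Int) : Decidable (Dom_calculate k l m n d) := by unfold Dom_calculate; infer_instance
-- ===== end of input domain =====

-- B replaces A's O(d) marking loop by a closed-form inclusion-exclusion over the 15
-- nonempty subsets of {k,l,m,n} (floor(d/lcm) per subset); equivalence proved for nonzero divisors.

-- ===== PORT A =====
-- body of A's for-loop: the elif chain, marking lista[i] = 1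
def calcStep (k : Int) (l : Int) (m : Int) (n : Int) (ls : List Int) (i : Int) : List Int :=
  if PySem.Int.mod (i + 1) k = 0 then PySem.List.pySetD ls i 1
  else if PySem.Int.mod (i + 1) l = 0 then PySem.List.pySetD ls i 1
  else if PySem.Int.mod (i + 1) m = 0 then PySem.List.pySetD ls i 1
  else if PySem.Int.mod (i + 1) n = 0 then PySem.List.pySetD ls i 1
  else ls

def calculate (k : Int) (l : Int) (m : Int) (n : Int) (d : Int) : Int :=
  -- lista = [0] * d  (empty for d ≤ 0, as in Python)
  let lista := List.replicate d.toNat (0 : Int)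
  -- for i in range(d): …
  let lista := (PySem.List.pyRange 0 d 1).foldl (calcStep k l m n) lista
  lista.sum

-- ===== PORT B =====
-- Source B's hand-written Euclid loop: 'while b: a, b = b, a % b' on abs values
def pyGcdAux (a : Nat) (b : Nat) : Nat :=
  if h : b = 0 then a else pyGcdAux b (a % b)
termination_by b
decreasing_by exact Nat.mod_lt _ (Nat.pos_of_ne_zero h)

def pyGcd (a : Int) (b : Int) : Nat := pyGcdAux a.natAbs b.natAbs

-- Source B's lcm: abs(a) // gcd(a, b) * abs(b)  (all operands nonnegative, so Nat division is exact Python //)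
def pyLcm (a : Int) (b : Int) : Int := (((a.natAbs / pyGcd a b) * b.natAbs : Nat) : Int)

def calculate_alt (k : Int) (l : Int) (m : Int) (n : Int) (d : Int) : Int :=
  let d0 : Int := if d < 0 then 0 else d
  let divs : List Int := [k, l, m, n]
  -- for mask in range(1, 16): …
  (PySem.List.pyRange 1 16 1).foldl (fun total mask =>
    -- inner loop: for j in range(4): if (mask >> j) & 1: L = lcm(L, divs[j]); bits += 1
    let st := (PySem.List.pyRange 0 4 1).foldl (fun (st : Int × Int) j =>
      if PySem.Int.band (mask >>> j.toNat) 1 ≠ 0 then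
        (pyLcm st.1 (PySem.List.pyGetD divs j 0), st.2 + 1)
      else st) ((1 : Int), (0 : Int))
    let term := PySem.Int.floordiv d0 st.1
    total + (if PySem.Int.mod st.2 2 = 1 then term else -term)) 0

-- ===== PRECONDITION & SPEC =====
-- Pre_ excludes inputs where some divisor is 0: there A either raises ZeroDivisionError
-- (when the zero modulus is reached) or returns trivially, while B's lcm-based division raises.
def Pre_calculate (k : Int) (l : Int) (m : Int) (n : Int) (d : Int) : Prop :=
  k ≠ 0 ∧ l ≠ 0 ∧ m ≠ 0 ∧ n ≠ 0
instance (k : Int) (l : Int) (m : Int) (n : Int) (d : Int) : Decidable (Pre_calculate k l m n d) := by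
  unfold Pre_calculate; infer_instance

def pvWitness_calculate : Int × Int × Int × Int × Int := (2, 3, 4, 5, 10)

def Spec_calculate (k : Int) (l : Int) (m : Int) (n : Int) (d : Int) (out : Int) : Prop := out = calculate_alt k l m n d
instance (k : Int) (l : Int) (m : Int) (n : Int) (d : Int) (out : Int) : Decidable (Spec_calculate k l m n d out) := by unfold Spec_calculate; infer_instance

-- ===== CLAIM (what is proved, stated in full; the proofs are below) =====
def Claim_equal_calculate : Prop := ∀ (k : Int) (l : Int) (m : Int) (n : Int) (d : Int), Dom_calculate k l m n d → Pre_calculate k l m n d → Spec_calculate k l m n d (calculate k l m n d)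

-- ===== LEMMAS AND PROOFS =====

theorem pyGcdAux_eq (b a : Nat) : pyGcdAux a b = Nat.gcd b a := by
  induction b using Nat.strong_induction_on generalizing a with
  | _ b ih =>
    rw [pyGcdAux]
    by_cases h : b = 0
    · simp [h]
    · rw [dif_neg h, ih (a % b) (Nat.mod_lt _ (Nat.pos_of_ne_zero h)) b, Nat.gcd_rec b a]

theorem pyLcm_eq (a b : Int) : pyLcm a b = ((Nat.lcm a.natAbs b.natAbs : Nat) : Int) := by
  unfold pyLcm pyGcd
  rw [pyGcdAux_eq, Nat.gcd_comm]
  congr 1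
  rcases Nat.eq_zero_or_pos (Nat.gcd a.natAbs b.natAbs) with h0 | hpos
  · have hx : a.natAbs = 0 := Nat.eq_zero_of_gcd_eq_zero_left h0
    simp [hx, Nat.lcm]
  · have h2 : a.natAbs / Nat.gcd a.natAbs b.natAbs * b.natAbs * Nat.gcd a.natAbs b.natAbs
        = a.natAbs * b.natAbs := by
      rw [Nat.mul_right_comm, Nat.div_mul_cancel (Nat.gcd_dvd_left _ _)]
    rw [Nat.lcm]
    exact (Nat.div_eq_of_eq_mul_left hpos h2.symm).symm

theorem pyLcm_pos {a b : Int} (ha : a ≠ 0) (hb : b ≠ 0) : 0 < pyLcm a b := by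
  rw [pyLcm_eq]
  have := Nat.lcm_ne_zero (Int.natAbs_ne_zero.mpr ha) (Int.natAbs_ne_zero.mpr hb)
  omega

theorem pyLcm_ne_zero {a b : Int} (ha : a ≠ 0) (hb : b ≠ 0) : pyLcm a b ≠ 0 :=
  ne_of_gt (pyLcm_pos ha hb)

theorem pyLcm_dvd_iff (a b d : Int) : pyLcm a b ∣ d ↔ (a ∣ d ∧ b ∣ d) := by
  rw [pyLcm_eq, Int.natCast_dvd, Nat.lcm_dvd_iff, Int.natAbs_dvd_natAbs, Int.natAbs_dvd_natAbs]

-- floor-division difference step: d//L - (d-1)//L is the divisibility indicator (L > 0)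
theorem fdiv_step (L d : Int) (hL : 0 < L) :
    PySem.Int.floordiv d L = PySem.Int.floordiv (d - 1) L + (if L ∣ d then 1 else 0) := by
  by_cases hdvd : L ∣ d
  · obtain ⟨c, hc⟩ := hdvd
    have h1 : PySem.Int.floordiv d L = c := by
      rw [PySem.Int.floordiv_eq_iff_of_pos hL]
      constructor <;> nlinarith
    have h2 : PySem.Int.floordiv (d - 1) L = c - 1 := by
      rw [PySem.Int.floordiv_eq_iff_of_pos hL]
      constructor <;> nlinarith
    rw [h1, h2, if_pos ⟨c, hc⟩]; ring
  · have hb : PySem.Int.floordiv (d-1) L * L ≤ d - 1 ∧ d - 1 < (PySem.Int.floordiv (d-1) L + 1) * L :=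
      (PySem.Int.floordiv_eq_iff_of_pos hL).mp rfl
    have hne : d ≠ (PySem.Int.floordiv (d-1) L + 1) * L := by
      intro h
      exact hdvd ⟨PySem.Int.floordiv (d-1) L + 1, by linarith [mul_comm (PySem.Int.floordiv (d-1) L + 1) L]⟩
    have h3 : PySem.Int.floordiv d L = PySem.Int.floordiv (d-1) L := by
      rw [PySem.Int.floordiv_eq_iff_of_pos hL]
      exact ⟨by linarith [hb.1], lt_of_le_of_ne (by linarith [hb.2]) hne⟩
    rw [h3, if_neg hdvd]; ring

-- closed form of B's double fold (15 signed floor-division terms, in mask order)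
theorem alt_closed (k l m n d : Int) :
    calculate_alt k l m n d =
      0 + PySem.Int.floordiv (if d < 0 then 0 else d) (pyLcm 1 k) + PySem.Int.floordiv (if d < 0 then 0 else d) (pyLcm 1 l) - PySem.Int.floordiv (if d < 0 then 0 else d) (pyLcm (pyLcm 1 k) l) + PySem.Int.floordiv (if d < 0 then 0 else d) (pyLcm 1 m) - PySem.Int.floordiv (if d < 0 then 0 else d) (pyLcm (pyLcm 1 k) m) - PySem.Int.floordiv (if d < 0 then 0 else d) (pyLcm (pyLcm 1 l) m) + PySem.Int.floordiv (if d < 0 then 0 else d) (pyLcm (pyLcm (pyLcm 1 k) l) m) + PySem.Int.floordiv (if d < 0 then 0 else d) (pyLcm 1 n) - PySem.Int.floordiv (if d < 0 then 0 else d) (pyLcm (pyLcm 1 k) n) - PySem.Int.floordiv (if d < 0 then 0 else d) (pyLcm (pyLcm 1 l) n) + PySem.Int.floordiv (if d < 0 then 0 else d) (pyLcm (pyLcm (pyLcm 1 k) l) n) - PySem.Int.floordiv (if d < 0 then 0 else d) (pyLcm (pyLcm 1 m) n) + PySem.Int.floordiv (if d < 0 then 0 else d) (pyLcm (pyLcm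 (pyLcm 1 k) m) n) + PySem.Int.floordiv (if d < 0 then 0 else d) (pyLcm (pyLcm (pyLcm 1 l) m) n) - PySem.Int.floordiv (if d < 0 then 0 else d) (pyLcm (pyLcm (pyLcm (pyLcm 1 k) l) m) n) := by
  rfl

theorem fdiv_zero_of_pos {L : Int} (hL : 0 < L) : PySem.Int.floordiv 0 L = 0 := by
  rw [PySem.Int.floordiv_eq_iff_of_pos hL]
  constructor <;> nlinarith

theorem alt_nonpos (k l m n d : Int) (hk : k ≠ 0) (hl : l ≠ 0) (hm : m ≠ 0) (hn : n ≠ 0)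
    (hd : d ≤ 0) : calculate_alt k l m n d = 0 := by
  have h1 : (1:Int) ≠ 0 := one_ne_zero
  have pk := pyLcm_ne_zero h1 hk
  have pl := pyLcm_ne_zero h1 hl
  have pm := pyLcm_ne_zero h1 hm
  have pn := pyLcm_ne_zero h1 hn
  have pkl := pyLcm_ne_zero pk hl
  have pkm := pyLcm_ne_zero pk hm
  have plm := pyLcm_ne_zero pl hm
  have pklm := pyLcm_ne_zero pkl hm
  have pkn := pyLcm_ne_zero pk hn
  have pln := pyLcm_ne_zero pl hn
  have pmn := pyLcm_ne_zero pm hn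
  have pkln := pyLcm_ne_zero pkl hn
  have pkmn := pyLcm_ne_zero pkm hn
  have plmn := pyLcm_ne_zero plm hn
  have pklmn := pyLcm_ne_zero pklm hn
  have hd0 : (if d < 0 then (0:Int) else d) = 0 := by split_ifs <;> omega
  rw [alt_closed, hd0]
  rw [fdiv_zero_of_pos (pyLcm_pos h1 hk), fdiv_zero_of_pos (pyLcm_pos h1 hl),
    fdiv_zero_of_pos (pyLcm_pos pk hl), fdiv_zero_of_pos (pyLcm_pos h1 hm),
    fdiv_zero_of_pos (pyLcm_pos pk hm), fdiv_zero_of_pos (pyLcm_pos pl hm),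
    fdiv_zero_of_pos (pyLcm_pos pkl hm), fdiv_zero_of_pos (pyLcm_pos h1 hn),
    fdiv_zero_of_pos (pyLcm_pos pk hn), fdiv_zero_of_pos (pyLcm_pos pl hn),
    fdiv_zero_of_pos (pyLcm_pos pkl hn), fdiv_zero_of_pos (pyLcm_pos pm hn),
    fdiv_zero_of_pos (pyLcm_pos pkm hn), fdiv_zero_of_pos (pyLcm_pos plm hn),
    fdiv_zero_of_pos (pyLcm_pos pklm hn)]
  ring

-- B recurrence in d, via the closed form and fdiv_step
theorem alt_rec (k l m n d : Int) (hk : k ≠ 0) (hl : l ≠ 0) (hm : m ≠ 0) (hn : n ≠ 0)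
    (hd : 0 < d) :
    calculate_alt k l m n d =
      calculate_alt k l m n (d - 1) + (if k ∣ d ∨ l ∣ d ∨ m ∣ d ∨ n ∣ d then 1 else 0) := by
  have h1 : (1:Int) ≠ 0 := one_ne_zero
  have pk := pyLcm_ne_zero h1 hk
  have pl := pyLcm_ne_zero h1 hl
  have pm := pyLcm_ne_zero h1 hm
  have pkl := pyLcm_ne_zero pk hl
  have pkm := pyLcm_ne_zero pk hm
  have plm := pyLcm_ne_zero pl hm
  have pklm := pyLcm_ne_zero pkl hm
  have hda : (if d < 0 then (0:Int) else d) = d := by split_ifs <;> omega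
  have hdb : (if d - 1 < 0 then (0:Int) else d - 1) = d - 1 := by split_ifs <;> omega
  rw [alt_closed k l m n d, alt_closed k l m n (d-1), hda, hdb]
  rw [fdiv_step _ d (pyLcm_pos h1 hk), fdiv_step _ d (pyLcm_pos h1 hl),
    fdiv_step _ d (pyLcm_pos pk hl), fdiv_step _ d (pyLcm_pos h1 hm),
    fdiv_step _ d (pyLcm_pos pk hm), fdiv_step _ d (pyLcm_pos pl hm),
    fdiv_step _ d (pyLcm_pos pkl hm), fdiv_step _ d (pyLcm_pos h1 hn),
    fdiv_step _ d (pyLcm_pos pk hn), fdiv_step _ d (pyLcm_pos pl hn),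
    fdiv_step _ d (pyLcm_pos pkl hn), fdiv_step _ d (pyLcm_pos pm hn),
    fdiv_step _ d (pyLcm_pos pkm hn), fdiv_step _ d (pyLcm_pos plm hn),
    fdiv_step _ d (pyLcm_pos pklm hn)]
  simp only [pyLcm_dvd_iff, one_dvd, true_and]
  by_cases hk' : k ∣ d <;> by_cases hl' : l ∣ d <;> by_cases hm' : m ∣ d <;> by_cases hn' : n ∣ d <;>
    simp only [hk', hl', hm', hn', and_true, and_false, true_and, false_and, true_or, or_true,
      false_or, or_false, if_true, if_false, and_self, or_self] <;> ring

theorem calcStep_length (k l m n : Int) (ls : List Int) (i : Int) :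
    (calcStep k l m n ls i).length = ls.length := by
  unfold calcStep
  split_ifs <;> simp [PySem.List.length_pySetD]

theorem foldl_calcStep_length (k l m n : Int) (xs : List Int) :
    ∀ (ls : List Int), (xs.foldl (calcStep k l m n) ls).length = ls.length := by
  induction xs with
  | nil => intro ls; rfl
  | cons i xs ih => intro ls; rw [List.foldl_cons, ih, calcStep_length]

theorem set_append_left_lt {α : Type} : ∀ (ls : List α) (x v : α) (j : Nat), j < ls.length →
    (ls ++ [x]).set j v = ls.set j v ++ [x] := by
  intro ls
  induction ls with
  | nil => intro x v j hj; simp at hj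
  | cons a t ih =>
    intro x v j hj
    cases j with
    | zero => rfl
    | succ j =>
      have hj' : j < t.length := Nat.lt_of_succ_lt_succ hj
      show a :: (t ++ [x]).set j v = a :: (t.set j v ++ [x])
      rw [ih x v j hj']

theorem set_append_end {α : Type} : ∀ (ls : List α) (x v : α),
    (ls ++ [x]).set ls.length v = ls ++ [v] := by
  intro ls
  induction ls with
  | nil => intro x v; rfl
  | cons a t ih =>
    intro x v
    show a :: (t ++ [x]).set t.length v = a :: (t ++ [v])
    rw [ih]

theorem calcStep_append (k l m n : Int) (ls : List Int) (x i : Int)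
    (hi0 : 0 ≤ i) (hilt : i.toNat < ls.length) :
    calcStep k l m n (ls ++ [x]) i = calcStep k l m n ls i ++ [x] := by
  have hcast : i = (i.toNat : Int) := (Int.toNat_of_nonneg hi0).symm
  have hS : PySem.List.pySetD (ls ++ [x]) ((i.toNat : Int)) (1:Int)
      = PySem.List.pySetD ls ((i.toNat : Int)) 1 ++ [x] := by
    rw [PySem.List.pySetD_natCast, PySem.List.pySetD_natCast,
      set_append_left_lt ls x 1 i.toNat hilt]
  unfold calcStep
  rw [hcast]
  split_ifs <;> first | rw [hS] | rfl

theorem foldl_calcStep_append (k l m n : Int) (xs : List Int) :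
    ∀ (ls : List Int) (x : Int), (∀ i ∈ xs, 0 ≤ i ∧ i.toNat < ls.length) →
      xs.foldl (calcStep k l m n) (ls ++ [x]) = xs.foldl (calcStep k l m n) ls ++ [x] := by
  induction xs with
  | nil => intro ls x _; rfl
  | cons i xs ih =>
    intro ls x h
    have hi := h i (List.mem_cons_self ..)
    rw [List.foldl_cons, List.foldl_cons, calcStep_append k l m n ls x i hi.1 hi.2]
    exact ih _ x (fun j hj => by
      have := h j (List.mem_cons_of_mem _ hj)
      rwa [calcStep_length])

theorem calc_nonpos (k l m n d : Int) (hd : d ≤ 0) : calculate k l m n d = 0 := by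
  have h1 : d.toNat = 0 := by omega
  have h2 : PySem.List.pyRange 0 d 1 = [] := PySem.List.pyRange_one_eq_nil (by omega)
  simp [calculate, h1, h2]

-- A recurrence in d
theorem calc_rec (k l m n d : Int) (hd : 0 < d) :
    calculate k l m n d =
      calculate k l m n (d - 1) + (if k ∣ d ∨ l ∣ d ∨ m ∣ d ∨ n ∣ d then 1 else 0) := by
  have hsplit : PySem.List.pyRange 0 d 1 = PySem.List.pyRange 0 (d-1) 1 ++ [d-1] := by
    have h := PySem.List.pyRange_one_succ_right (a := (0:Int)) (b := d-1) (by omega)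
    rw [sub_add_cancel] at h
    exact h
  have hrepl : List.replicate d.toNat (0:Int) = List.replicate (d-1).toNat 0 ++ [0] := by
    have h : d.toNat = (d-1).toNat + 1 := by omega
    rw [h, List.replicate_succ']
  simp only [calculate]
  rw [hsplit, hrepl, List.foldl_append,
    foldl_calcStep_append k l m n _ _ _ (fun i hi => by
      rw [PySem.List.mem_pyRange_one] at hi
      simp only [List.length_replicate]
      omega)]
  set P := (PySem.List.pyRange 0 (d-1) 1).foldl (calcStep k l m n) (List.replicate (d-1).toNat 0) with hP
  have hPlen : P.length = (d-1).toNat := by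
    rw [hP, foldl_calcStep_length, List.length_replicate]
  have hcast : d - 1 = ((d-1).toNat : Int) := (Int.toNat_of_nonneg (by omega)).symm
  have hsum : ∀ v : Int, (PySem.List.pySetD (P ++ [(0:Int)]) (d-1) v).sum = P.sum + v := by
    intro v
    rw [hcast, PySem.List.pySetD_natCast, ← hPlen, set_append_end, List.sum_append]
    simp
  have hd1 : d - 1 + 1 = d := by ring
  simp only [List.foldl_cons, List.foldl_nil]
  unfold calcStep
  rw [hd1]
  clear_value P
  clear hP hsplit hrepl hPlen hcast hd hd1
  split_ifs
  all_goals simp_all [List.sum_append, PySem.Int.mod_eq_zero_iff_dvd]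

-- ===== VERDICT (by name: the statement is the Claim_ definition above) =====
theorem calculate_spec : Claim_equal_calculate := by
  intro k l m n d _ hpre
  obtain ⟨hk, hl, hm, hn⟩ := hpre
  unfold Spec_calculate
  have H : ∀ N : Nat, calculate k l m n (N : Int) = calculate_alt k l m n (N : Int) := by
    intro N
    induction N with
    | zero => rw [calc_nonpos _ _ _ _ _ (by norm_num), alt_nonpos _ _ _ _ _ hk hl hm hn (by norm_num)]
    | succ N ih =>
      have hd : (0:Int) < ((N+1 : Nat) : Int) := by push_cast; omega
      have hsub : ((N+1 : Nat) : Int) - 1 = (N : Int) := by push_cast; ring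
      rw [calc_rec _ _ _ _ _ hd, alt_rec _ _ _ _ _ hk hl hm hn hd, hsub, ih]
  by_cases h : d ≤ 0
  · rw [calc_nonpos _ _ _ _ _ h, alt_nonpos _ _ _ _ _ hk hl hm hn h]
  · have hc : d = (d.toNat : Int) := (Int.toNat_of_nonneg (by omega)).symm
    rw [hc]
    exact H d.toNat
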